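-- pv_equiv track=rewrite | github.com/lizaigaoge550/Algebra | read_data_v3.py | generate_multi_tags
-- ===== SOURCE A (Python) =====
-- import copy
--
-- def generate_index(inital,s,count):
--     if count == 0:
--         s.append(copy.copy(inital))
--         return
--     for i in range(2):
--         inital.append(i)
--         generate_index(inital,s,count-1)
--         del inital[-1]
--
-- def no_pat(tag,index):
--     s = []
--     for i in range(len(tag[index])):
--         if tag[index][i] != 'pat':
--             s.append(tag[index][i])
--     return s
--
-- def generate_multi_tags(tag):
--     #tag中可能有pat所以要拆分
--     #获取pat的索引
--     pat_index = []
--     index_count = 0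
--     for tag_index in range(len(tag)):
--         if 'pat' in tag[tag_index]:
--             pat_index.append(tag_index)
--             index_count += 1
--     #产生索引
--     s = []
--     generate_index([],s,index_count)
--     data = []
--
--     for s_index in range(len(s)):
--         tag_copy = copy.copy(tag)
--         for index,value in zip(pat_index,s[s_index]):
--             if value == 0:
--                 tag_copy[index] = []
--             else:
--                 tag_copy[index] = no_pat(tag_copy,index)
--         data.append(tag_copy)
--     return data
-- ===== SOURCE B (Python) =====
-- def generate_multi_tags(tag):
--     # one pair (index, filtered-copy) per pat position; enumerate combinations by bitmask
--     pats = [(i, [x for x in t if x != 'pat']) for i, t in enumerate(tag) if 'pat' in t]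
--     k = len(pats)
--     data = []
--     for m in range(2 ** k):
--         row = list(tag)
--         for j, (i, f) in enumerate(pats):
--             row[i] = list(f) if (m >> (k - 1 - j)) & 1 else []
--         data.append(row)
--     return data
-- ===== Notes on version B (the rewrite author's own statement) =====
-- stated objective: simpler
-- what changed: Replaces the recursive binary-index generator plus per-row re-filtering with a single bitmask loop over range(2**k) that assigns precomputed filtered copies into the pat positions.
import Mathlib
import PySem

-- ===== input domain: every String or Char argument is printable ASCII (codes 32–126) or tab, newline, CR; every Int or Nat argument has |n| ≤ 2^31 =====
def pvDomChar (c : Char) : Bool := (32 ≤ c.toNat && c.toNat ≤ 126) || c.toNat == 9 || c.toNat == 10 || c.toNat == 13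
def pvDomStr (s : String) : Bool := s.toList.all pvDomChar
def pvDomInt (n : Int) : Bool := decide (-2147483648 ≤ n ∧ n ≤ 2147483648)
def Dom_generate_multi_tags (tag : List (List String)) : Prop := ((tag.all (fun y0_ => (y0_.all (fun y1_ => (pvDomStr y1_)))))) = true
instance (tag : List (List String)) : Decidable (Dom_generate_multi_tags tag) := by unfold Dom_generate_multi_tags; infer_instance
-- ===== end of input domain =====

-- B replaces A's recursive binary-index generator and per-row re-filtering by a single
-- bitmask loop over range(2**k) assigning precomputed filtered copies (objective: simpler).

-- ===== PORT A =====
-- generate_index(inital, s, count): count is always the number of pat positions here (≥ 0), so Nat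
def generate_index (inital : List Int) (s : List (List Int)) : Nat → List (List Int)
  | 0 => s ++ [inital]
  | n + 1 =>
    -- for i in range(2): inital.append(i); recurse; del inital[-1]
    let s0 := generate_index (inital ++ [0]) s n
    generate_index (inital ++ [1]) s0 n

def no_pat (tag : List (List String)) (index : Int) : List String :=
  let row := PySem.List.pyGetD tag index []
  (PySem.List.pyRange 0 (row.length : Int) 1).foldl
    (fun s i => if PySem.List.pyGetD row i "" ≠ "pat" then s ++ [PySem.List.pyGetD row i ""] else s) []

def generate_multi_tags (tag : List (List String)) : List (List (List String)) :=
  let pi := (PySem.List.pyRange 0 (tag.length : Int) 1).foldl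
    (fun (acc : List Int × Int) tag_index =>
      if "pat" ∈ PySem.List.pyGetD tag tag_index [] then (acc.1 ++ [tag_index], acc.2 + 1) else acc)
    ([], 0)
  let pat_index := pi.1
  let index_count := pi.2
  let s := generate_index [] [] index_count.toNat
  (PySem.List.pyRange 0 (s.length : Int) 1).foldl
    (fun data s_index =>
      let tag_copy := (pat_index.zip (PySem.List.pyGetD s s_index [])).foldl
        (fun tc (p : Int × Int) =>
          if p.2 = 0 then PySem.List.pySetD tc p.1 ([] : List String)
          else PySem.List.pySetD tc p.1 (no_pat tc p.1)) tag
      data ++ [tag_copy]) []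

-- ===== PORT B =====
def generate_multi_tags_alt (tag : List (List String)) : List (List (List String)) :=
  let pats := ((PySem.List.enumerate tag).filter (fun p => "pat" ∈ p.2)).map
      (fun p => (p.1, p.2.filter (fun x => x ≠ "pat")))
  let k := pats.length
  (List.range (2 ^ k)).foldl
    (fun data m =>
      let row := (PySem.List.enumerate pats).foldl
        (fun row q =>
          PySem.List.pySetD row q.2.1
            (if (m >>> (k - 1 - q.1.toNat)) &&& 1 ≠ 0 then q.2.2 else [])) tag
      data ++ [row]) []

-- ===== PRECONDITION & SPEC =====
def Spec_generate_multi_tags (tag : List (List String)) (out : List (List (List String))) : Prop := out = generate_multi_tags_alt tag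
instance (tag : List (List String)) (out : List (List (List String))) : Decidable (Spec_generate_multi_tags tag out) := by unfold Spec_generate_multi_tags; infer_instance

-- ===== CLAIM (what is proved, stated in full; the proofs are below) =====
def Claim_equal_generate_multi_tags : Prop := ∀ (tag : List (List String)), Dom_generate_multi_tags tag → Spec_generate_multi_tags tag (generate_multi_tags tag)

-- ===== LEMMAS AND PROOFS =====

-- the set of binary index sequences produced by generate_index, in its order
def allSeqs : Nat → List (List Int)
  | 0 => [[]]
  | n + 1 => (allSeqs n).map (fun v => 0 :: v) ++ (allSeqs n).map (fun v => 1 :: v)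

-- the bit sequence B reads off a bitmask m (MSB first)
def bitsL (k m : Nat) : List Int :=
  (List.range k).map (fun j => (((m >>> (k - 1 - j)) &&& 1 : Nat) : Int))

lemma gi_eq (count : Nat) : ∀ (inital : List Int) (s : List (List Int)),
    generate_index inital s count = s ++ (allSeqs count).map (fun v => inital ++ v) := by
  induction count with
  | zero => intro inital s; simp [generate_index, allSeqs]
  | succ n ih =>
    intro inital s
    simp only [generate_index, ih, allSeqs, List.map_append, List.map_map, List.append_assoc]
    refine congrArg₂ _ rfl (congrArg₂ _ ?_ ?_) <;>
      (apply List.map_congr_left; intro v _; simp [Function.comp_apply])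

lemma shift_and_one (x t : Nat) : (x >>> t) &&& 1 = (x / 2 ^ t) % 2 := by
  rw [Nat.shiftRight_eq_div_pow, Nat.and_one_is_mod]

lemma bit_add_pow (k t m : Nat) (ht : t < k) :
    ((2 ^ k + m) >>> t) &&& 1 = (m >>> t) &&& 1 := by
  rw [shift_and_one, shift_and_one]
  obtain ⟨r, hr⟩ : ∃ r, k = t + 1 + r := ⟨k - t - 1, by omega⟩
  subst hr
  rw [show (2:Nat) ^ (t + 1 + r) + m = 2 ^ t * (2 * 2 ^ r) + m by ring]
  rw [Nat.mul_add_div (by positivity)]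
  omega

lemma bitsL_succ (k m : Nat) :
    bitsL (k + 1) m = (((m >>> k) &&& 1 : Nat) : Int) :: bitsL k m := by
  unfold bitsL
  rw [List.range_succ_eq_map, List.map_cons, List.map_map]
  refine congrArg₂ _ (by norm_num) ?_
  apply List.map_congr_left
  intro j hj
  simp only [Function.comp_apply, Nat.succ_eq_add_one]
  rw [show k + 1 - 1 - (j + 1) = k - 1 - j from by omega]

lemma range_map_bitsL (k : Nat) : (List.range (2 ^ k)).map (bitsL k) = allSeqs k := by
  induction k with
  | zero => simp [allSeqs, bitsL]
  | succ k ih =>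
    rw [show 2 ^ (k + 1) = 2 ^ k + 2 ^ k by ring, List.range_add, List.map_append, List.map_map]
    unfold allSeqs
    congr 1
    · rw [← ih, List.map_map]
      apply List.map_congr_left
      intro m hm
      simp only [List.mem_range] at hm
      simp only [Function.comp_apply, bitsL_succ]
      rw [shift_and_one, Nat.div_eq_of_lt hm]
      norm_num
    · rw [← ih, List.map_map]
      apply List.map_congr_left
      intro m hm
      simp only [List.mem_range] at hm
      simp only [Function.comp_apply, bitsL_succ]
      refine congrArg₂ _ ?_ ?_
      · rw [shift_and_one, show 2 ^ k + m = 2 ^ k * 1 + m by ring,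
          Nat.mul_add_div (by positivity), Nat.div_eq_of_lt hm]
        norm_num
      · unfold bitsL
        apply List.map_congr_left
        intro j hj
        simp only [List.mem_range] at hj
        rw [bit_add_pow k (k - 1 - j) m (by omega)]

-- A's pat_index / index_count loop, expressed over enumerate
lemma patfold (es : List (Int × List String)) (a : List Int) (n : Int) :
    es.foldl (fun acc p => if "pat" ∈ p.2 then (acc.1 ++ [p.1], acc.2 + 1) else acc) (a, n)
    = (a ++ (es.filter (fun p => "pat" ∈ p.2)).map (fun p => p.1),
       n + ((es.filter (fun p => "pat" ∈ p.2)).length : Int)) := by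
  induction es generalizing a n with
  | nil => simp
  | cons e tl ih =>
    by_cases h : "pat" ∈ e.2
    · simp [h, ih, List.append_assoc]
      ring
    · simp [h, ih]

lemma no_pat_eq (tag : List (List String)) (i : Int) :
    no_pat tag i = (PySem.List.pyGetD tag i []).filter (fun x => x ≠ "pat") := by
  unfold no_pat
  rw [PySem.List.foldl_pyRange_zero_pyGetD' (PySem.List.pyGetD tag i []) ""
    (fun s x => if x ≠ "pat" then s ++ [x] else s) []]
  rw [PySem.List.foldl_append_ite_eq_filter]
  simp

-- the two per-row folds agree
lemma row_agree (k m : Nat) (ps : List (Int × List String)) :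
    ∀ (j0 : Nat) (tc : List (List String)),
    (∀ q ∈ ps, 0 ≤ q.1 ∧ q.1 < (tc.length : Int)) →
    (∀ q ∈ ps, q.2 = (PySem.List.pyGetD tc q.1 []).filter (fun x => x ≠ "pat")) →
    ps.Pairwise (fun a b => a.1 ≠ b.1) →
    ((ps.map (fun p => p.1)).zip ((List.range' j0 ps.length).map
        (fun j => (((m >>> (k - 1 - j)) &&& 1 : Nat) : Int)))).foldl
      (fun tc (p : Int × Int) =>
        if p.2 = 0 then PySem.List.pySetD tc p.1 ([] : List String)
        else PySem.List.pySetD tc p.1 (no_pat tc p.1)) tc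
    = (PySem.List.enumerate ps (j0 : Int)).foldl
      (fun row q => PySem.List.pySetD row q.2.1
        (if (m >>> (k - 1 - q.1.toNat)) &&& 1 ≠ 0 then q.2.2 else [])) tc := by
  induction ps with
  | nil => intro j0 tc _ _ _; simp [PySem.List.enumerate_nil]
  | cons q tl ih =>
    intro j0 tc hb hv hp
    have hq := hb q (List.mem_cons_self)
    have hqv := hv q (List.mem_cons_self)
    rw [List.length_cons, List.range'_succ, List.map_cons, List.map_cons, List.zip_cons_cons,
      PySem.List.enumerate_cons, List.foldl_cons, List.foldl_cons]
    have step : ∀ (w : List String),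
        ((tl.map (fun p => p.1)).zip ((List.range' (j0 + 1) tl.length).map
            (fun j => (((m >>> (k - 1 - j)) &&& 1 : Nat) : Int)))).foldl
          (fun tc (p : Int × Int) =>
            if p.2 = 0 then PySem.List.pySetD tc p.1 ([] : List String)
            else PySem.List.pySetD tc p.1 (no_pat tc p.1)) (PySem.List.pySetD tc q.1 w)
        = (PySem.List.enumerate tl ((j0 : Int) + 1)).foldl
          (fun row q => PySem.List.pySetD row q.2.1
            (if (m >>> (k - 1 - q.1.toNat)) &&& 1 ≠ 0 then q.2.2 else []))
          (PySem.List.pySetD tc q.1 w) := by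
      intro w
      rw [show ((j0 : Int) + 1) = ((j0 + 1 : Nat) : Int) from by push_cast; ring]
      apply ih (j0 + 1)
      · intro r hr
        have := hb r (List.mem_cons_of_mem _ hr)
        simpa [PySem.List.length_pySetD] using this
      · intro r hr
        have hrb := hb r (List.mem_cons_of_mem _ hr)
        have hne : q.1 ≠ r.1 := (List.pairwise_cons.mp hp).1 r hr
        rw [hv r (List.mem_cons_of_mem _ hr)]
        have hget : PySem.List.pyGetD (PySem.List.pySetD tc q.1 w) r.1 ([] : List String)
            = PySem.List.pyGetD tc r.1 ([] : List String) := by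
          rw [PySem.List.pySetD_of_nonneg tc w hq.1]
          rw [PySem.List.pyGetD_eq_getElem (tc.set q.1.toNat w) [] hrb.1
            (by simpa using hrb.2)]
          rw [PySem.List.pyGetD_eq_getElem tc [] hrb.1 hrb.2]
          exact List.getElem_set_ne (by omega) _
        rw [hget]
      · exact (List.pairwise_cons.mp hp).2
    dsimp only
    rw [show ((j0 : Int)).toNat = j0 from Int.toNat_natCast j0]
    by_cases hbit : (m >>> (k - 1 - j0)) &&& 1 = 0
    · rw [if_pos (show (((m >>> (k - 1 - j0)) &&& 1 : Nat) : Int) = 0 by exact_mod_cast hbit)]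
      rw [if_neg (by simp [hbit])]
      exact step []
    · rw [if_neg (show ¬ ((((m >>> (k - 1 - j0)) &&& 1 : Nat) : Int) = 0) by exact_mod_cast hbit)]
      rw [if_pos hbit]
      rw [no_pat_eq, ← hqv]
      exact step q.2

-- row_agree instantiated at the top level: ps = B's pats list, tc = tag, j0 = 0
lemma row_agree_top (tag : List (List String)) (m : Nat) :
    ((((PySem.List.enumerate tag).filter (fun p => "pat" ∈ p.2)).map (fun p => p.1)).zip
      (bitsL (((PySem.List.enumerate tag).filter (fun p => "pat" ∈ p.2)).length) m)).foldl
      (fun tc (p : Int × Int) =>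
        if p.2 = 0 then PySem.List.pySetD tc p.1 ([] : List String)
        else PySem.List.pySetD tc p.1 (no_pat tc p.1)) tag
    = (PySem.List.enumerate (((PySem.List.enumerate tag).filter (fun p => "pat" ∈ p.2)).map
        (fun p => (p.1, p.2.filter (fun x => x ≠ "pat"))))).foldl
      (fun row q => PySem.List.pySetD row q.2.1
        (if (m >>> ((((PySem.List.enumerate tag).filter (fun p => "pat" ∈ p.2)).length) - 1 - q.1.toNat)) &&& 1 ≠ 0
         then q.2.2 else [])) tag := by
  have hmem : ∀ q ∈ ((PySem.List.enumerate tag).filter (fun p => "pat" ∈ p.2)).map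
      (fun p => (p.1, p.2.filter (fun x => x ≠ "pat"))),
      ∃ (k' : Nat) (h : k' < tag.length),
        q = ((k' : Int), (tag[k']).filter (fun x => x ≠ "pat")) := by
    intro q hq
    rcases List.mem_map.mp hq with ⟨p, hpF, rfl⟩
    rcases (PySem.List.mem_enumerate_iff tag 0 p).mp (List.mem_filter.mp hpF).1 with ⟨k', hk', hpe⟩
    exact ⟨k', hk', by rw [hpe]; simp⟩
  have hb : ∀ q ∈ ((PySem.List.enumerate tag).filter (fun p => "pat" ∈ p.2)).map
      (fun p => (p.1, p.2.filter (fun x => x ≠ "pat"))), 0 ≤ q.1 ∧ q.1 < (tag.length : Int) := by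
    intro q hq
    rcases hmem q hq with ⟨k', hk', rfl⟩
    refine ⟨by positivity, ?_⟩
    show ((k' : Int)) < ((tag.length : Nat) : Int)
    exact_mod_cast hk'
  have hv : ∀ q ∈ ((PySem.List.enumerate tag).filter (fun p => "pat" ∈ p.2)).map
      (fun p => (p.1, p.2.filter (fun x => x ≠ "pat"))),
      q.2 = (PySem.List.pyGetD tag q.1 []).filter (fun x => x ≠ "pat") := by
    intro q hq
    rcases hmem q hq with ⟨k', hk', rfl⟩
    simp [PySem.List.pyGetD_natCast, hk']
  have hp : (((PySem.List.enumerate tag).filter (fun p => "pat" ∈ p.2)).map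
      (fun p => (p.1, p.2.filter (fun x => x ≠ "pat")))).Pairwise (fun a b => a.1 ≠ b.1) := by
    refine List.pairwise_map.mpr ?_
    exact ((PySem.List.pairwise_lt_enumerate tag 0).filter _).imp (fun hab => ne_of_lt hab)
  have hr := row_agree (((PySem.List.enumerate tag).filter (fun p => "pat" ∈ p.2)).length) m
    (((PySem.List.enumerate tag).filter (fun p => "pat" ∈ p.2)).map
      (fun p => (p.1, p.2.filter (fun x => x ≠ "pat")))) 0 tag hb hv hp
  simpa [List.map_map, Function.comp_def, ← List.range_eq_range', bitsL] using hr

theorem generate_multi_tags_spec : Claim_equal_generate_multi_tags := by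
  intro tag _
  unfold Spec_generate_multi_tags generate_multi_tags generate_multi_tags_alt
  have he := PySem.List.enumerate_eq_map_pyRange tag ([] : List String)
  simp only [PySem.List.len_eq] at he
  -- A's first loop computes (pat positions, their count)
  have h1 : (PySem.List.pyRange 0 ((tag.length : Int)) 1).foldl
      (fun (acc : List Int × Int) tag_index =>
        if "pat" ∈ PySem.List.pyGetD tag tag_index [] then (acc.1 ++ [tag_index], acc.2 + 1) else acc)
      ([], 0)
      = (((PySem.List.enumerate tag).filter (fun p => "pat" ∈ p.2)).map (fun p => p.1),
         ((((PySem.List.enumerate tag).filter (fun p => "pat" ∈ p.2)).length : Nat) : Int)) := by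
    have h0 := patfold (PySem.List.enumerate tag) [] 0
    conv at h0 => lhs; rw [he, List.foldl_map]
    simpa using h0
  dsimp only
  rw [h1]
  dsimp only
  rw [Int.toNat_natCast, gi_eq]
  simp only [List.nil_append, List.map_id']
  rw [PySem.List.foldl_pyRange_zero_pyGetD'
      (allSeqs (((PySem.List.enumerate tag).filter (fun p => "pat" ∈ p.2)).length))
      ([] : List Int)
      (fun data v => data ++
        [List.foldl
          (fun tc (p : Int × Int) =>
            if p.2 = 0 then PySem.List.pySetD tc p.1 ([] : List String)
            else PySem.List.pySetD tc p.1 (no_pat tc p.1))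
          tag
          ((((PySem.List.enumerate tag).filter (fun p => "pat" ∈ p.2)).map (fun p => p.1)).zip v)])
      ([] : List (List (List String)))]
  rw [PySem.List.foldl_append_singleton_eq_map, PySem.List.foldl_append_singleton_eq_map]
  simp only [List.nil_append, List.length_map]
  rw [← range_map_bitsL, List.map_map]
  apply List.map_congr_left
  intro m _
  simpa using row_agree_top tag m
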